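-- pv_equiv track=rewrite | github.com/AdaCore/style_checker | asclib/ex.py | quote_arg
-- ===== SOURCE A (Python) =====
-- def quote_arg(arg):
--     """Return the quoted version of the given argument.
--
--     Returns a human-friendly representation of the given argument, but with all
--     extra quoting done if necessary.  The intent is to produce an argument
--     image that can be copy/pasted on a POSIX shell command (at a shell prompt).
--     :param arg: argument to quote
--     :type arg: str
--     """
--     # The empty argument is a bit of a special case, as it does not
--     # contain any character that might need quoting, and yet still
--     # needs to be quoted.
--     if arg == '':
--         return "''"
--
--     need_quoting = ('|', '&', ';', '<', '>', '(', ')', '$',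
--                     '`', '\\', '"', "'", ' ', '\t', '\n',
--                     # The POSIX spec says that the following
--                     # characters might need some extra quoting
--                     # depending on the circumstances.  We just
--                     # always quote them, to be safe (and to avoid
--                     # things like file globbing which are sometimes
--                     # performed by the shell). We do leave '%' and
--                     # '=' alone, as I don't see how they could
--                     # cause problems.
--                     '*', '?', '[', '#', '~')
--     for char in need_quoting:
--         if char in arg:
--             # The way we do this is by simply enclosing the argument
--             # inside single quotes.  However, we have to be careful
--             # of single-quotes inside the argument, as they need
--             # to be escaped (which we cannot do while still inside.
--             # a single-quote string).
--             arg = arg.replace("'", r"'\''")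
--             # Also, it seems to be nicer to print new-line characters
--             # as '\n' rather than as a new-line...
--             arg = arg.replace('\n', r"'\n'")
--             return "'%s'" % arg
--     # No quoting needed.  Return the argument as is.
--     return arg
-- ===== SOURCE B (Python) =====
-- # B: one pass over arg's characters against a precomputed frozenset, instead of
-- # one substring scan of arg per special character. (idiomatic)
--
-- _SPECIAL = frozenset("|&;<>()$`\\\"' \t\n*?[#~")
--
--
-- def quote_arg(arg):
--     if arg == '':
--         return "''"
--     if any(c in _SPECIAL for c in arg):
--         return "'%s'" % arg.replace("'", r"'\''").replace('\n', r"'\n'")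
--     return arg
-- ===== Notes on version B (the rewrite author's own statement) =====
-- stated objective: idiomatic
-- what changed: Detection is a single pass over arg's characters testing O(1) membership in a precomputed frozenset of the special characters, instead of A's loop over the 20 special characters each doing a substring scan of arg.
import Mathlib
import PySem

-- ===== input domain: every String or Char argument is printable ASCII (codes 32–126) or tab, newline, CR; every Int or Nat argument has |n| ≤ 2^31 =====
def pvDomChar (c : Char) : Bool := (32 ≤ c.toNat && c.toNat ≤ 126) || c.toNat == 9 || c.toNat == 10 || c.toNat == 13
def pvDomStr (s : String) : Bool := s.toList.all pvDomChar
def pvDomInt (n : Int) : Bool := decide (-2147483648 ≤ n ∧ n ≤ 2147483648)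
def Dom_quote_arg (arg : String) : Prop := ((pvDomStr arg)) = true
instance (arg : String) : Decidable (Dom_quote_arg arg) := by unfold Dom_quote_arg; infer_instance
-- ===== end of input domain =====

-- B replaces A's per-special-character substring scans by one pass over arg's
-- characters against a precomputed set of the special characters (idiomatic).

-- ===== PORT A =====
-- the tuple need_quoting, in A's order
def pvNeedQuoting : List Char :=
  ['|', '&', ';', '<', '>', '(', ')', '$', '`', '\\', '"', '\'', ' ', '\t', '\n',
   '*', '?', '[', '#', '~']

-- 'for char in need_quoting: if char in arg: … return …' / fall through to 'return arg'
def pvQuoteLoop (chars : List Char) (arg : String) : String :=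
  match chars with
  | [] => arg
  | c :: rest =>
      if PySem.Str.isIn (String.ofList [c]) arg then
        "'" ++ PySem.Str.replace (PySem.Str.replace arg "'" "'\\''") "\n" "'\\n'" ++ "'"
      else pvQuoteLoop rest arg

def quote_arg (arg : String) : String :=
  if arg = "" then "''"
  else pvQuoteLoop pvNeedQuoting arg

-- ===== PORT B =====
-- _SPECIAL = frozenset("|&;<>()$`\\\"' \t\n*?[#~")
def pvSpecial : PySem.Set Char := PySem.Set.ofList "|&;<>()$`\\\"' \t\n*?[#~".toList

def quote_arg_alt (arg : String) : String :=
  if arg = "" then "''"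
  else if arg.toList.any (fun c => PySem.Set.contains pvSpecial c) then
    "'" ++ PySem.Str.replace (PySem.Str.replace arg "'" "'\\''") "\n" "'\\n'" ++ "'"
  else arg

-- ===== PRECONDITION & SPEC =====
def Spec_quote_arg (arg : String) (out : String) : Prop := out = quote_arg_alt arg
instance (arg : String) (out : String) : Decidable (Spec_quote_arg arg out) := by unfold Spec_quote_arg; infer_instance

-- ===== CLAIM (what is proved, stated in full; the proofs are below) =====
def Claim_equal_quote_arg : Prop := ∀ (arg : String), Dom_quote_arg arg → Spec_quote_arg arg (quote_arg arg)

-- ===== LEMMAS AND PROOFS =====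

theorem singleton_infix_iff_mem {α : Type} (a : α) (l : List α) :
    [a] <:+: l ↔ a ∈ l := by
  constructor
  · intro h
    exact (List.singleton_sublist).1 h.sublist
  · intro h
    obtain ⟨s, t, rfl⟩ := List.append_of_mem h
    exact ⟨s, t, by simp⟩

theorem quoteLoop_eq (chars : List Char) (arg : String) :
    pvQuoteLoop chars arg =
      if chars.any (fun c => PySem.Str.isIn (String.ofList [c]) arg) then
        "'" ++ PySem.Str.replace (PySem.Str.replace arg "'" "'\\''") "\n" "'\\n'" ++ "'"
      else arg := by
  induction chars with
  | nil => simp [pvQuoteLoop]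
  | cons c rest ih =>
      by_cases h : PySem.Str.isIn (String.ofList [c]) arg = true
      · simp only [pvQuoteLoop, h, if_true, List.any_cons, Bool.true_or]
      · rw [Bool.not_eq_true] at h
        simp only [pvQuoteLoop, h, Bool.false_eq_true, if_false, List.any_cons,
          Bool.false_or, ih]

theorem special_toList : "|&;<>()$`\\\"' \t\n*?[#~".toList = pvNeedQuoting := by
  decide

theorem cond_swap (arg : String) :
    (pvNeedQuoting.any (fun c => PySem.Str.isIn (String.ofList [c]) arg)) =
      (arg.toList.any (fun c => PySem.Set.contains pvSpecial c)) := by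
  rw [Bool.eq_iff_iff]
  simp only [List.any_eq_true, PySem.Str.isIn_eq, String.toList_ofList,
    PySem.Chars.isIn_iff_infix, singleton_infix_iff_mem,
    PySem.Set.contains_iff, pvSpecial, PySem.Set.mem_ofList, special_toList]
  exact ⟨fun ⟨c, h1, h2⟩ => ⟨c, h2, h1⟩, fun ⟨c, h1, h2⟩ => ⟨c, h2, h1⟩⟩

-- ===== VERDICT (by name: the statement is the Claim_ definition above) =====
theorem quote_arg_spec : Claim_equal_quote_arg := by
  intro arg _
  unfold Spec_quote_arg quote_arg quote_arg_alt
  by_cases h0 : arg = ""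
  · simp [h0]
  · simp only [h0, if_false, quoteLoop_eq, cond_swap]
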